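-- pv_equiv track=rewrite | github.com/mmagnus/rna-tools | rna_tools/tools/openfold/rna_geometric_cropping.py | build_weighted_adj_list
-- ===== SOURCE A (Python) =====
-- from typing import Dict, List, Optional, Tuple
--
-- def build_weighted_adj_list(L: int, pairs: Dict[int, int]) -> List[List[Tuple[int, int]]]:
--     """
--     Build adjacency list with weights.
--     Each entry adj[u] contains (v, w) edges.
--
--     Sequential edges: weight 1
--     Base-pair edges: weight 0
--     """
--     adj: List[List[Tuple[int, int]]] = [[] for _ in range(L)]
--
--     # sequential neighbors
--     for i in range(L - 1):
--         adj[i].append((i + 1, 1))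
--         adj[i + 1].append((i, 1))
--
--     # base pairs
--     for i, j in pairs.items():
--         if i < j:
--             adj[i].append((j, 0))
--             adj[j].append((i, 0))
--
--     return adj
-- ===== SOURCE B (Python) =====
-- def build_weighted_adj_list(L, pairs):
--     """Flat edge list + stable sort by node + bucket scatter, instead of in-place per-node appends."""
--     edges = [(u, u - 1, 1) for u in range(1, L)]
--     edges += [(u, u + 1, 1) for u in range(L - 1)]
--     for i, j in pairs.items():
--         if i < j:
--             edges.append((i, j, 0))
--             edges.append((j, i, 0))
--     edges.sort(key=lambda e: e[0])
--     adj = [[] for _ in range(L)]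
--     for u, v, w in edges:
--         adj[u].append((v, w))
--     return adj
-- ===== Notes on version B (the rewrite author's own statement) =====
-- stated objective: alternative
-- what changed: B builds one flat list of weighted edge records, stable-sorts it by source node, and scatters it into buckets in a single final pass, instead of A's two loops that append into per-node lists in place.
-- intended difference: On inputs with L >= 2 and a kept base pair (i, j), i < j, with negative i, Python's adj[i] silently wraps to node i+L, so A appends the pair edge after that node's sequential edges, while B groups edges under their stated source node i and the wrapped row starts with the pair edge; negative node ids are outside the function's purpose and B's grouping is the straightforward reading. — e.g. on build_weighted_adj_list(2, [(-2, 1)]): A returns [[(1, 1), (1, 0)], [(0, 1), (-2, 0)]], B returns [[(1, 0), (1, 1)], [(0, 1), (-2, 0)]]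
import Mathlib
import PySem

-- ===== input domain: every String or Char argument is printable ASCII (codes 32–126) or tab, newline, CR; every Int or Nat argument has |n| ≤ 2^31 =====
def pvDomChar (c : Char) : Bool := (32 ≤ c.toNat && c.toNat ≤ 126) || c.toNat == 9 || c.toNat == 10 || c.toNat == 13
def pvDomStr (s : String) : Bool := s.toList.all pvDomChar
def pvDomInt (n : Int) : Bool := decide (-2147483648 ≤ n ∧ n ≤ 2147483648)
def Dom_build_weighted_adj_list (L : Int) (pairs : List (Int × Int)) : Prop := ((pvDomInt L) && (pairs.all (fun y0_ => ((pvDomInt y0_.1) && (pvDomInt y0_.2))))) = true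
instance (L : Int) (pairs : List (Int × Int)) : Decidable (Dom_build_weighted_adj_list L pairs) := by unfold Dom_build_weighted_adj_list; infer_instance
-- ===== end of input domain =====

-- B replaces A's in-place per-node appends by a flat edge list that is stable-sorted by
-- source node and then scattered into buckets; objective: alternative algorithm.

-- shared primitive: Python's `adj[u].append(x)` on a list of lists, with negative-index
-- wraparound; out-of-range indices (IndexError in Python, excluded by Pre_) leave adj unchanged.
def pvWrap (i n : Int) : Int := if i < 0 then i + n else i

def pvAppendAt (adj : List (List (Int × Int))) (i : Int) (x : Int × Int) : List (List (Int × Int)) :=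
  if 0 ≤ pvWrap i adj.length ∧ pvWrap i adj.length < adj.length then
    adj.modify (pvWrap i adj.length).toNat (fun r => r ++ [x])
  else adj

-- ===== PORT A =====
-- A's `for i, j in pairs.items(): if i < j: adj[i].append(..); adj[j].append(..)` loop
def pvPairLoop (items : List (Int × Int)) (adj : List (List (Int × Int))) : List (List (Int × Int)) :=
  items.foldl (fun a p => if p.1 < p.2 then pvAppendAt (pvAppendAt a p.1 (p.2, 0)) p.2 (p.1, 0) else a) adj

def build_weighted_adj_list (L : Int) (pairs : List (Int × Int)) : List (List (Int × Int)) :=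
  pvPairLoop ((PySem.Dict.ofList pairs).items)
    ((PySem.List.pyRange 0 (L - 1) 1).foldl
      (fun a i => pvAppendAt (pvAppendAt a i (i + 1, 1)) (i + 1) (i, 1))
      (List.replicate L.toNat []))

-- ===== PORT B =====
def build_weighted_adj_list_alt (L : Int) (pairs : List (Int × Int)) : List (List (Int × Int)) :=
  (PySem.List.sorted
      (((PySem.Dict.ofList pairs).items).foldl
        (fun es p => if p.1 < p.2 then es ++ [(p.1, p.2, (0 : Int)), (p.2, p.1, (0 : Int))] else es)
        (((PySem.List.pyRange 1 L 1).map (fun u => (u, u - 1, (1 : Int))))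
          ++ ((PySem.List.pyRange 0 (L - 1) 1).map (fun u => (u, u + 1, (1 : Int))))))
      (fun e => e.1)).foldl
    (fun a e => pvAppendAt a e.1 e.2) (List.replicate L.toNat [])

-- ===== PRECONDITION & SPEC =====
-- Pre_ excludes exactly the inputs on which Python A raises IndexError: some dict item
-- (i, j) with i < j whose i or j falls outside [-L, L) after the dict's key dedup.
def Pre_build_weighted_adj_list (L : Int) (pairs : List (Int × Int)) : Prop :=
  ∀ p ∈ (PySem.Dict.ofList pairs).items,
    p.1 < p.2 → (-L ≤ p.1 ∧ p.1 < L ∧ -L ≤ p.2 ∧ p.2 < L)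
instance (L : Int) (pairs : List (Int × Int)) : Decidable (Pre_build_weighted_adj_list L pairs) := by
  unfold Pre_build_weighted_adj_list; infer_instance

def pvWitness_build_weighted_adj_list : Int × (List (Int × Int)) := (4, [(0, 3), (1, 2)])

-- On L ≥ 2 with a kept base pair (i, j), i < j, whose i is negative, A silently wraps adj[i]
-- around to node i+L and appends the pair edge after that node's sequential edges, while B,
-- which groups edges by their stated source node, puts that pair edge first; negative node ids
-- are outside the function's purpose and B's grouping is the straightforward reading.
def D_build_weighted_adj_list (L : Int) (pairs : List (Int × Int)) : Prop :=
  2 ≤ L ∧ ∃ p ∈ (PySem.Dict.ofList pairs).items, p.1 < p.2 ∧ p.1 < 0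
instance (L : Int) (pairs : List (Int × Int)) : Decidable (D_build_weighted_adj_list L pairs) := by
  unfold D_build_weighted_adj_list; infer_instance

def Spec_build_weighted_adj_list (L : Int) (pairs : List (Int × Int)) (out : List (List (Int × Int))) : Prop := ¬ D_build_weighted_adj_list L pairs → out = build_weighted_adj_list_alt L pairs
instance (L : Int) (pairs : List (Int × Int)) (out : List (List (Int × Int))) : Decidable (Spec_build_weighted_adj_list L pairs out) := by unfold Spec_build_weighted_adj_list; infer_instance

def pvDiffWitness_build_weighted_adj_list : Int × (List (Int × Int)) := (2, [(-2, 1)])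
def pvDiffWitnessOut_build_weighted_adj_list : (List (List (Int × Int))) × (List (List (Int × Int))) :=
  ([[(1, 1), (1, 0)], [(0, 1), (-2, 0)]], [[(1, 0), (1, 1)], [(0, 1), (-2, 0)]])

-- ===== CLAIM (what is proved, stated in full; the proofs are below) =====
def Claim_unchanged_build_weighted_adj_list : Prop := ∀ (L : Int) (pairs : List (Int × Int)), Dom_build_weighted_adj_list L pairs → Pre_build_weighted_adj_list L pairs → Spec_build_weighted_adj_list L pairs (build_weighted_adj_list L pairs)
def Claim_changed_build_weighted_adj_list : Prop := Dom_build_weighted_adj_list (pvDiffWitness_build_weighted_adj_list.1) (pvDiffWitness_build_weighted_adj_list.2) ∧ Pre_build_weighted_adj_list (pvDiffWitness_build_weighted_adj_list.1) (pvDiffWitness_build_weighted_adj_list.2) ∧ D_build_weighted_adj_list (pvDiffWitness_build_weighted_adj_list.1) (pvDiffWitness_build_weighted_adj_list.2) ∧ build_weighted_adj_list (pvDiffWitness_build_weighted_adj_list.1) (pvDiffWitness_build_weighted_adj_list.2) = pvDiffWitnessOut_build_weighted_adj_list.1 ∧ build_weighted_adj_list_alt (pvDiffWitness_build_weighted_adj_list.1)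 (pvDiffWitness_build_weighted_adj_list.2) = pvDiffWitnessOut_build_weighted_adj_list.2 ∧ pvDiffWitnessOut_build_weighted_adj_list.1 ≠ pvDiffWitnessOut_build_weighted_adj_list.2

-- ===== LEMMAS AND PROOFS =====

-- scatter: fold a flat edge list into the adjacency rows (the final loop of B,
-- and — after the reshaping lemmas below — also the two loops of A)
def pvScatter (es : List (Int × Int × Int)) (adj : List (List (Int × Int))) : List (List (Int × Int)) :=
  es.foldl (fun a e => pvAppendAt a e.1 e.2) adj

-- the edges A's pair loop appends, as a flat list
def pvEmit (items : List (Int × Int)) : List (Int × Int × Int) :=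
  items.flatMap (fun p => if p.1 < p.2 then [(p.1, p.2, (0 : Int)), (p.2, p.1, (0 : Int))] else [])

theorem pvScatter_append (es fs : List (Int × Int × Int)) (adj : List (List (Int × Int))) :
    pvScatter (es ++ fs) adj = pvScatter fs (pvScatter es adj) := by
  simp [pvScatter, List.foldl_append]

theorem pvAppendAt_length (a : List (List (Int × Int))) (i : Int) (x : Int × Int) :
    (pvAppendAt a i x).length = a.length := by
  unfold pvAppendAt; split <;> simp

theorem pvScatter_length (es : List (Int × Int × Int)) (adj : List (List (Int × Int))) :
    (pvScatter es adj).length = adj.length := by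
  unfold pvScatter
  induction es generalizing adj with
  | nil => rfl
  | cons e es ih => simp only [List.foldl_cons]; rw [ih, pvAppendAt_length]

-- A's pair loop is the scatter of its emitted edges
theorem pairLoop_eq_scatter (items : List (Int × Int)) (adj : List (List (Int × Int))) :
    pvPairLoop items adj = pvScatter (pvEmit items) adj := by
  unfold pvPairLoop pvEmit
  induction items generalizing adj with
  | nil => rfl
  | cons p rest ih =>
    simp only [List.foldl_cons, List.flatMap_cons]
    rw [pvScatter_append]
    split
    · rw [ih]; rfl
    · rw [ih]; rfl

-- A's sequential loop is the scatter of its emitted edges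
theorem seqLoop_eq_scatter (l : List Int) (adj : List (List (Int × Int))) :
    l.foldl (fun a i => pvAppendAt (pvAppendAt a i (i + 1, 1)) (i + 1) (i, 1)) adj
      = pvScatter (l.flatMap (fun i => [(i, i + 1, (1 : Int)), (i + 1, i, (1 : Int))])) adj := by
  induction l generalizing adj with
  | nil => rfl
  | cons i rest ih =>
    simp only [List.foldl_cons, List.flatMap_cons]
    rw [pvScatter_append, ih]; rfl

theorem A_as_scatter (L : Int) (pairs : List (Int × Int)) :
    build_weighted_adj_list L pairs
      = pvScatter (((PySem.List.pyRange 0 (L - 1) 1).flatMap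
            (fun i => [(i, i + 1, (1 : Int)), (i + 1, i, (1 : Int))]))
          ++ pvEmit ((PySem.Dict.ofList pairs).items))
          (List.replicate L.toNat []) := by
  unfold build_weighted_adj_list
  rw [seqLoop_eq_scatter, pairLoop_eq_scatter, pvScatter_append]

-- B's pair-appending loop appends the same flat list pvEmit
theorem B_edges (items : List (Int × Int)) (es : List (Int × Int × Int)) :
    items.foldl (fun es p => if p.1 < p.2 then es ++ [(p.1, p.2, (0 : Int)), (p.2, p.1, (0 : Int))] else es) es
      = es ++ pvEmit items := by
  unfold pvEmit
  induction items generalizing es with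
  | nil => simp
  | cons p rest ih =>
    simp only [List.foldl_cons, List.flatMap_cons]
    split
    · rw [ih, List.append_assoc]
    · rw [ih]; simp

-- STABILITY: filtering a stable sort by one key value gives the original filter
theorem insertBy_filter_key (x : Int × Int × Int) (l : List (Int × Int × Int)) (k : Int)
    (h : l.Pairwise (fun a b => a.1 ≤ b.1)) :
    (PySem.List.insertBy (fun a b => decide (a.1 < b.1)) x l).filter (fun e => decide (e.1 = k))
      = l.filter (fun e => decide (e.1 = k)) ++ if x.1 = k then [x] else [] := by
  induction l with
  | nil =>
    simp only [PySem.List.insertBy, List.filter_cons, List.filter_nil]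
    by_cases hx : x.1 = k <;> simp [hx]
  | cons y ys ih =>
    simp only [PySem.List.insertBy]
    split
    · rename_i hlt
      have hlt' : x.1 < y.1 := by simpa using hlt
      by_cases hx : x.1 = k
      · have hnone : (y :: ys).filter (fun e => decide (e.1 = k)) = [] := by
          rw [List.filter_eq_nil_iff]
          intro z hz
          have hyz : y.1 ≤ z.1 := by
            rcases List.mem_cons.mp hz with h' | h'
            · subst h'; omega
            · exact (List.pairwise_cons.mp h).1 z h'
          simp only [decide_eq_true_eq]
          omega
        have hxl : (x :: y :: ys).filter (fun e => decide (e.1 = k))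
            = x :: ((y :: ys).filter (fun e => decide (e.1 = k))) := by
          rw [List.filter_cons, if_pos (by simpa using hx)]
        rw [hxl, hnone, if_pos hx]
        simp
      · have hxl : (x :: y :: ys).filter (fun e => decide (e.1 = k))
            = (y :: ys).filter (fun e => decide (e.1 = k)) := by
          rw [List.filter_cons, if_neg (by simpa using hx)]
        rw [hxl, if_neg hx]
        simp
    · rename_i hge
      have hys := (List.pairwise_cons.mp h).2
      rw [List.filter_cons, List.filter_cons, ih hys]
      by_cases hy : y.1 = k <;> simp [hy]

theorem insertBy_pairwise (x : Int × Int × Int) (l : List (Int × Int × Int))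
    (h : l.Pairwise (fun a b => a.1 ≤ b.1)) :
    (PySem.List.insertBy (fun a b => decide (a.1 < b.1)) x l).Pairwise (fun a b => a.1 ≤ b.1) := by
  induction l with
  | nil => simp [PySem.List.insertBy]
  | cons y ys ih =>
    simp only [PySem.List.insertBy]
    rcases List.pairwise_cons.mp h with ⟨hy, hys⟩
    split
    · rename_i hlt
      have hlt' : x.1 < y.1 := by simpa using hlt
      refine List.pairwise_cons.mpr ⟨?_, h⟩
      intro z hz
      rcases List.mem_cons.mp hz with h' | h'
      · subst h'; omega
      · have := hy z h'; omega
    · rename_i hge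
      have hge' : ¬ x.1 < y.1 := by simpa using hge
      refine List.pairwise_cons.mpr ⟨?_, ih hys⟩
      intro z hz
      rcases (PySem.List.mem_insertBy (fun a b => decide (a.1 < b.1)) x z ys).mp hz with h' | h'
      · subst h'; omega
      · exact hy z h'

theorem sorted_filter_key (xs : List (Int × Int × Int)) (k : Int) :
    (PySem.List.sorted xs (fun e => e.1)).filter (fun e => decide (e.1 = k))
      = xs.filter (fun e => decide (e.1 = k)) := by
  rw [PySem.List.sorted_eq_foldl_insertBy]
  suffices h : ∀ (ys : List (Int × Int × Int)) (acc : List (Int × Int × Int)),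
      acc.Pairwise (fun a b => a.1 ≤ b.1) →
      (ys.foldl (fun acc x => PySem.List.insertBy (fun a b => decide (a.1 < b.1)) x acc) acc).filter
          (fun e => decide (e.1 = k))
        = acc.filter (fun e => decide (e.1 = k)) ++ ys.filter (fun e => decide (e.1 = k)) by
    simpa using h xs [] (by simp)
  intro ys
  induction ys with
  | nil => intro acc _; simp
  | cons y ys ih =>
    intro acc hacc
    simp only [List.foldl_cons, List.filter_cons]
    rw [ih _ (insertBy_pairwise y acc hacc), insertBy_filter_key y acc k hacc]
    by_cases hy : y.1 = k <;> simp [hy]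

-- scatter rows, characterised by filtering the edge list (all source nodes in range)
theorem pvScatter_getD (es : List (Int × Int × Int)) (adj : List (List (Int × Int)))
    (h : ∀ e ∈ es, 0 ≤ e.1 ∧ e.1 < (adj.length : Int)) (k : Nat) (hk : k < adj.length) :
    (pvScatter es adj).getD k [] = adj.getD k []
      ++ (es.filter (fun e => decide (e.1 = (k : Int)))).map (fun e => e.2) := by
  induction es generalizing adj with
  | nil => simp [pvScatter]
  | cons e es ih =>
    rcases h e (List.mem_cons_self) with ⟨h0, h1⟩
    have hstep : pvScatter (e :: es) adj = pvScatter es (pvAppendAt adj e.1 e.2) := rfl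
    have hlen : (pvAppendAt adj e.1 e.2).length = adj.length := pvAppendAt_length _ _ _
    have hw : pvWrap e.1 (adj.length : Int) = e.1 := by
      unfold pvWrap; rw [if_neg (by omega)]
    have hget : (pvAppendAt adj e.1 e.2).getD k []
        = adj.getD k [] ++ if e.1 = (k : Int) then [e.2] else [] := by
      unfold pvAppendAt
      rw [hw, if_pos ⟨by omega, by omega⟩]
      rw [List.getD_eq_getElem _ _ (by simpa [List.length_modify] using hk),
        List.getD_eq_getElem _ _ hk]
      simp only [List.getElem_modify]
      by_cases hek : e.1 = (k : Int)
      · rw [if_pos (by omega), if_pos hek]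
      · rw [if_neg (by omega), if_neg hek]
        simp
    rw [hstep, ih _ (by intro f hf; rw [hlen]; exact h f (List.mem_cons_of_mem _ hf)) (by omega)]
    rw [hget, List.filter_cons]
    by_cases hek : e.1 = (k : Int)
    · simp [hek, List.append_assoc]
    · simp [hek]

-- filter of a pyRange map of single edges keyed by the range element
theorem filter_pyRange_map_aux (a : Int) (g : Int → Int × Int) (k : Int) :
    ∀ (n : Nat) (b : Int), b - a = (n : Int) →
    (((PySem.List.pyRange a b 1).map (fun u => (u, g u))).filter (fun e => decide (e.1 = k)))
      = if a ≤ k ∧ k < b then [(k, g k)] else [] := by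
  intro n
  induction n with
  | zero =>
    intro b hb
    have hnil : PySem.List.pyRange a b 1 = [] := by
      rw [PySem.List.pyRange_one]
      simp [show (b - a).toNat = 0 by omega]
    have c0 : ¬ (a ≤ k ∧ k < b) := by omega
    rw [hnil, if_neg c0]
    rfl
  | succ n ih =>
    intro b hb
    have hsplit : PySem.List.pyRange a b 1 = PySem.List.pyRange a (b - 1) 1 ++ [b - 1] := by
      have h1 : a ≤ b - 1 := by omega
      have := PySem.List.pyRange_one_succ_right (a := a) (b := b - 1) h1
      simpa [show b - 1 + 1 = b from by ring] using this
    rw [hsplit, List.map_append, List.filter_append, ih (b - 1) (by omega)]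
    simp only [List.map_cons, List.map_nil, List.filter_cons, List.filter_nil,
      decide_eq_true_eq]
    by_cases hk : b - 1 = k
    · have c0 : ¬ (a ≤ k ∧ k < b - 1) := by omega
      have cB : a ≤ k ∧ k < b := by omega
      rw [if_pos hk, if_neg c0, if_pos cB]
      simp [hk]
    · have hcong : (a ≤ k ∧ k < b - 1) ↔ (a ≤ k ∧ k < b) := by omega
      rw [if_neg hk, if_congr hcong rfl rfl]
      simp

theorem filter_pyRange_map (a b : Int) (g : Int → Int × Int) (k : Int) :
    (((PySem.List.pyRange a b 1).map (fun u => (u, g u))).filter (fun e => decide (e.1 = k)))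
      = if a ≤ k ∧ k < b then [(k, g k)] else [] := by
  by_cases hab : a ≤ b
  · exact filter_pyRange_map_aux a g k (b - a).toNat b (by omega)
  · have hnil : PySem.List.pyRange a b 1 = [] := by
      rw [PySem.List.pyRange_one]
      simp [show (b - a).toNat = 0 by omega]
    have c0 : ¬ (a ≤ k ∧ k < b) := by omega
    rw [hnil, if_neg c0]
    rfl

-- filter of A's interleaved sequential edges
theorem filter_seqA_aux (k : Int) :
    ∀ (n : Nat) (b : Int), b = (n : Int) →
    (((PySem.List.pyRange 0 b 1).flatMap
        (fun u => [(u, u + 1, (1 : Int)), (u + 1, u, (1 : Int))])).filter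
          (fun e => decide (e.1 = k)))
      = (if 1 ≤ k ∧ k ≤ b then [(k, k - 1, (1 : Int))] else [])
        ++ (if 0 ≤ k ∧ k < b then [(k, k + 1, (1 : Int))] else []) := by
  intro n
  induction n with
  | zero =>
    intro b hb
    have hnil : PySem.List.pyRange 0 b 1 = [] := by
      rw [PySem.List.pyRange_one]
      simp
      omega
    have c1 : ¬ (1 ≤ k ∧ k ≤ b) := by omega
    have c2 : ¬ (0 ≤ k ∧ k < b) := by omega
    rw [hnil, if_neg c1, if_neg c2]
    rfl
  | succ n ih =>
    intro b hb
    have hsplit : PySem.List.pyRange 0 b 1 = PySem.List.pyRange 0 (b - 1) 1 ++ [b - 1] := by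
      have h1 : (0 : Int) ≤ b - 1 := by omega
      have := PySem.List.pyRange_one_succ_right (a := 0) (b := b - 1) h1
      simpa [show b - 1 + 1 = b from by ring] using this
    rw [hsplit, List.flatMap_append, List.filter_append, ih (b - 1) (by omega)]
    simp only [List.flatMap_cons, List.flatMap_nil, List.append_nil, List.filter_cons,
      List.filter_nil, decide_eq_true_eq, show b - 1 + 1 = b from by ring]
    by_cases h1 : b - 1 = k
    · -- the new chunk contributes the right edge of node b-1
      have c2 : ¬ b = k := by omega
      have lC : (1 ≤ k ∧ k ≤ b - 1) ↔ (1 ≤ k ∧ k ≤ b) := by omega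
      have r0 : ¬ (0 ≤ k ∧ k < b - 1) := by omega
      have rB : 0 ≤ k ∧ k < b := by omega
      have hb1 : b = k + 1 := by omega
      rw [if_pos h1, if_neg c2, if_congr lC rfl rfl, if_neg r0, if_pos rB]
      simp [hb1]
    · by_cases h2 : b = k
      · -- the new chunk contributes the left edge of node b
        have l0 : ¬ (1 ≤ k ∧ k ≤ b - 1) := by omega
        have lB : 1 ≤ k ∧ k ≤ b := by omega
        have r0 : ¬ (0 ≤ k ∧ k < b - 1) := by omega
        have rB0 : ¬ (0 ≤ k ∧ k < b) := by omega
        rw [if_neg h1, if_pos h2, if_neg l0, if_pos lB, if_neg r0, if_neg rB0]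
        simp [h2]
      · have lC : (1 ≤ k ∧ k ≤ b - 1) ↔ (1 ≤ k ∧ k ≤ b) := by omega
        have rC : (0 ≤ k ∧ k < b - 1) ↔ (0 ≤ k ∧ k < b) := by omega
        rw [if_neg h1, if_neg h2, if_congr lC rfl rfl, if_congr rC rfl rfl]
        simp

theorem filter_seqA (b k : Int) :
    (((PySem.List.pyRange 0 b 1).flatMap
        (fun u => [(u, u + 1, (1 : Int)), (u + 1, u, (1 : Int))])).filter
          (fun e => decide (e.1 = k)))
      = (if 1 ≤ k ∧ k ≤ b then [(k, k - 1, (1 : Int))] else [])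
        ++ (if 0 ≤ k ∧ k < b then [(k, k + 1, (1 : Int))] else []) := by
  by_cases hb : 0 ≤ b
  · exact filter_seqA_aux k b.toNat b (by omega)
  · have hnil : PySem.List.pyRange 0 b 1 = [] := by
      rw [PySem.List.pyRange_one]
      simp
      omega
    have c1 : ¬ (1 ≤ k ∧ k ≤ b) := by omega
    have c2 : ¬ (0 ≤ k ∧ k < b) := by omega
    rw [hnil, if_neg c1, if_neg c2]
    rfl

-- pvEmit of a list with no kept entry is empty
theorem pvEmit_nil_of_none (items : List (Int × Int)) (h : ∀ p ∈ items, ¬ p.1 < p.2) :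
    pvEmit items = [] := by
  unfold pvEmit
  induction items with
  | nil => rfl
  | cons p rest ih =>
    simp only [List.flatMap_cons]
    rw [if_neg (h p List.mem_cons_self), ih (fun q hq => h q (List.mem_cons_of_mem _ hq))]
    rfl

-- with distinct keys and every kept entry equal to (-1, 0) there is at most one kept entry
theorem pvEmit_cases (items : List (Int × Int)) (hnodup : (items.map (fun p => p.1)).Nodup)
    (hkept : ∀ p ∈ items, p.1 < p.2 → p = (-1, 0)) :
    pvEmit items = [] ∨ pvEmit items = [(-1, 0, 0), (0, -1, 0)] := by
  induction items with
  | nil => left; rfl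
  | cons p rest ih =>
    simp only [List.map_cons, List.nodup_cons] at hnodup
    obtain ⟨hhead, htail⟩ := hnodup
    by_cases hp : p.1 < p.2
    · have hpv := hkept p List.mem_cons_self hp
      have hrest : ∀ q ∈ rest, ¬ q.1 < q.2 := by
        intro q hq hql
        have hqv := hkept q (List.mem_cons_of_mem _ hq) hql
        apply hhead
        have : q.1 ∈ rest.map (fun p => p.1) := List.mem_map_of_mem hq
        rw [hqv] at this
        rw [hpv]
        exact this
      right
      have h0 : pvEmit rest = [] := pvEmit_nil_of_none rest hrest
      unfold pvEmit at h0 ⊢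
      simp only [List.flatMap_cons]
      rw [if_pos hp, h0, hpv]
      rfl
    · have := ih htail (fun q hq hl => hkept q (List.mem_cons_of_mem _ hq) hl)
      unfold pvEmit at this ⊢
      simp only [List.flatMap_cons]
      rw [if_neg hp]
      simpa using this

-- the main agreement lemma: no kept base pair has a negative first node
theorem main_eq (L : Int) (pairs : List (Int × Int))
    (hpre : Pre_build_weighted_adj_list L pairs)
    (hneg : ∀ p ∈ (PySem.Dict.ofList pairs).items, p.1 < p.2 → 0 ≤ p.1) :
    build_weighted_adj_list L pairs = build_weighted_adj_list_alt L pairs := by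
  have hB : build_weighted_adj_list_alt L pairs
      = pvScatter (PySem.List.sorted
          ((((PySem.List.pyRange 1 L 1).map (fun u => (u, u - 1, (1 : Int))))
              ++ ((PySem.List.pyRange 0 (L - 1) 1).map (fun u => (u, u + 1, (1 : Int)))))
            ++ pvEmit ((PySem.Dict.ofList pairs).items)) (fun e => e.1))
          (List.replicate L.toNat []) := by
    unfold build_weighted_adj_list_alt
    rw [B_edges]
    rfl
  have hEmitRange : ∀ e ∈ pvEmit ((PySem.Dict.ofList pairs).items),
      0 ≤ e.1 ∧ e.1 < ((List.replicate L.toNat ([] : List (Int × Int))).length : Int) := by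
    intro e he
    unfold pvEmit at he
    rw [List.mem_flatMap] at he
    obtain ⟨p, hp, hep⟩ := he
    by_cases hk : p.1 < p.2
    · rw [if_pos hk] at hep
      have hb := hpre p hp hk
      have hn := hneg p hp hk
      rcases List.mem_cons.mp hep with h' | h'
      · subst h'; simp; omega
      · rcases List.mem_cons.mp h' with h'' | h''
        · subst h''; simp; omega
        · simp at h''
    · rw [if_neg hk] at hep
      simp at hep
  rw [A_as_scatter, hB]
  apply List.ext_getElem
  · rw [pvScatter_length, pvScatter_length]
  · intro k h1 h2
    rw [pvScatter_length] at h1 h2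
    rw [← List.getD_eq_getElem _ [] (by rw [pvScatter_length]; exact h1),
      ← List.getD_eq_getElem _ [] (by rw [pvScatter_length]; exact h2)]
    rw [pvScatter_getD _ _ ?hinA k h1, pvScatter_getD _ _ ?hinB k h2]
    case hinA =>
      intro e he
      rcases List.mem_append.mp he with h' | h'
      · rw [List.mem_flatMap] at h'
        obtain ⟨i, hi, hei⟩ := h'
        rw [PySem.List.mem_pyRange_one] at hi
        rcases List.mem_cons.mp hei with h'' | h''
        · subst h''; simp; omega
        · rcases List.mem_cons.mp h'' with h3 | h3
          · subst h3; simp; omega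
          · simp at h3
      · exact hEmitRange e h'
    case hinB =>
      intro e he
      rw [PySem.List.mem_sorted] at he
      rcases List.mem_append.mp he with h' | h'
      · rcases List.mem_append.mp h' with h'' | h''
        · rw [List.mem_map] at h''
          obtain ⟨u, hu, heu⟩ := h''
          rw [PySem.List.mem_pyRange_one] at hu
          subst heu; simp; omega
        · rw [List.mem_map] at h''
          obtain ⟨u, hu, heu⟩ := h''
          rw [PySem.List.mem_pyRange_one] at hu
          subst heu; simp; omega
      · exact hEmitRange e h'
    rw [sorted_filter_key, List.filter_append, List.filter_append, List.filter_append]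
    rw [filter_seqA (L - 1) (k : Int)]
    rw [filter_pyRange_map 1 L (fun u => (u - 1, (1 : Int))) (k : Int)]
    rw [filter_pyRange_map 0 (L - 1) (fun u => (u + 1, (1 : Int))) (k : Int)]
    rw [if_congr (show (1 ≤ (k : Int) ∧ (k : Int) ≤ L - 1) ↔ (1 ≤ (k : Int) ∧ (k : Int) < L) by omega) rfl rfl]

-- the remaining agreed corner: L = 1 with the single possible kept pair (-1, 0)
theorem main_L1 (pairs : List (Int × Int))
    (hpre : Pre_build_weighted_adj_list 1 pairs) :
    build_weighted_adj_list 1 pairs = build_weighted_adj_list_alt 1 pairs := by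
  have hkept : ∀ p ∈ (PySem.Dict.ofList pairs).items, p.1 < p.2 → p = (-1, 0) := by
    intro p hp hlt
    have hb := hpre p hp hlt
    rcases p with ⟨x, y⟩
    simp only [Prod.mk.injEq]
    simp only at hb hlt
    constructor <;> omega
  have hnodup : (((PySem.Dict.ofList pairs).items).map (fun p => p.1)).Nodup := by
    have := PySem.Dict.nodup_keys_ofList pairs
    simpa [PySem.Dict.keys] using this
  have hemit := pvEmit_cases _ hnodup hkept
  have hr0 : PySem.List.pyRange 0 (1 - 1 : Int) 1 = [] := by
    rw [PySem.List.pyRange_one]; norm_num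
  have hr1 : PySem.List.pyRange 1 (1 : Int) 1 = [] := by
    rw [PySem.List.pyRange_one]; norm_num
  have hA : build_weighted_adj_list 1 pairs
      = pvScatter (pvEmit ((PySem.Dict.ofList pairs).items)) (List.replicate (1 : Int).toNat []) := by
    rw [A_as_scatter, hr0]
    rfl
  have hBe : build_weighted_adj_list_alt 1 pairs
      = pvScatter (PySem.List.sorted (pvEmit ((PySem.Dict.ofList pairs).items)) (fun e => e.1))
          (List.replicate (1 : Int).toNat []) := by
    unfold build_weighted_adj_list_alt
    rw [B_edges, hr0, hr1]
    rfl
  have hsorted : PySem.List.sorted (pvEmit ((PySem.Dict.ofList pairs).items)) (fun e => e.1)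
      = pvEmit ((PySem.Dict.ofList pairs).items) := by
    rcases hemit with h | h <;> rw [h]
    · exact PySem.List.sorted_eq_self_of_pairwise _ _ (by simp)
    · exact PySem.List.sorted_eq_self_of_pairwise _ _ (by norm_num [List.pairwise_cons])
  rw [hA, hBe, hsorted]

-- ===== VERDICT (by name: the statement is the Claim_ definition above) =====
theorem build_weighted_adj_list_spec : Claim_unchanged_build_weighted_adj_list := by
  intro L pairs _ hpre hnD
  by_cases hneg : ∀ p ∈ (PySem.Dict.ofList pairs).items, p.1 < p.2 → 0 ≤ p.1
  · exact main_eq L pairs hpre hneg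
  · push_neg at hneg
    obtain ⟨p, hp, hlt, hp1⟩ := hneg
    have hb := hpre p hp hlt
    have hL2 : ¬ 2 ≤ L := fun h2 => hnD ⟨h2, p, hp, hlt, by omega⟩
    have hL : L = 1 := by omega
    subst hL
    exact main_L1 pairs hpre

theorem build_weighted_adj_list_changed : Claim_changed_build_weighted_adj_list := by
  unfold Claim_changed_build_weighted_adj_list; decide
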